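-- pv_equiv track=rewrite | github.com/itu-square/sat-metropolis | src/mcmc_sat/sat.py | reverse_bit_blasting_simp
-- ===== SOURCE A (Python) =====
-- def reverse_bit_blasting_simp(variable_values: dict[str, list[bool]],
--                               num_samples: int,
--                               num_vars: int,
--                               num_bits: int) -> list[dict[str, int]]:
--     def from_bin_to_dec(i, s, num_bits, map_variable_values):
--         x = f'x{i}'
--         total = 0
--         for j in range(num_bits):
--             total += 2**j * map_variable_values[f'{x}{j}'][s]
--         return total
--
--     solver_samples = [{f'x{i}': from_bin_to_dec(i, s, num_bits, variable_values)
--                        for i in range(num_vars)} for s in range(num_samples)]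
--
--     return solver_samples
-- ===== SOURCE B (Python) =====
-- def reverse_bit_blasting_simp(variable_values: dict[str, list[bool]],
--                               num_samples: int,
--                               num_vars: int,
--                               num_bits: int) -> list[dict[str, int]]:
--     # Column-major: for each variable fetch its bit lists once (MSB first),
--     # decode every sample with Horner's rule, then assemble the per-sample dicts.
--     if num_samples <= 0:   # nothing to decode
--         return []
--     cols = []
--     for i in range(num_vars):
--         bit_lists = [variable_values[f'x{i}{j}'] for j in range(num_bits - 1, -1, -1)]
--         vals = []
--         for s in range(num_samples):
--             v = 0
--             for bl in bit_lists:
--                 v = 2 * v + (1 if bl[s] else 0)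
--             vals.append(v)
--         cols.append((f'x{i}', vals))
--     return [{name: vals[s] for name, vals in cols} for s in range(num_samples)]
-- ===== Notes on version B (the rewrite author's own statement) =====
-- stated objective: alternative
-- what changed: B traverses column-major (per variable, fetching each bit list from the dict once) and decodes each sample with Horner's rule over the bits MSB-first, instead of A's per-sample, per-variable sum of 2**j terms with a fresh dict lookup for every (sample, variable, bit); the per-sample dicts are assembled at the end from the precomputed columns.
import Mathlib
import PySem

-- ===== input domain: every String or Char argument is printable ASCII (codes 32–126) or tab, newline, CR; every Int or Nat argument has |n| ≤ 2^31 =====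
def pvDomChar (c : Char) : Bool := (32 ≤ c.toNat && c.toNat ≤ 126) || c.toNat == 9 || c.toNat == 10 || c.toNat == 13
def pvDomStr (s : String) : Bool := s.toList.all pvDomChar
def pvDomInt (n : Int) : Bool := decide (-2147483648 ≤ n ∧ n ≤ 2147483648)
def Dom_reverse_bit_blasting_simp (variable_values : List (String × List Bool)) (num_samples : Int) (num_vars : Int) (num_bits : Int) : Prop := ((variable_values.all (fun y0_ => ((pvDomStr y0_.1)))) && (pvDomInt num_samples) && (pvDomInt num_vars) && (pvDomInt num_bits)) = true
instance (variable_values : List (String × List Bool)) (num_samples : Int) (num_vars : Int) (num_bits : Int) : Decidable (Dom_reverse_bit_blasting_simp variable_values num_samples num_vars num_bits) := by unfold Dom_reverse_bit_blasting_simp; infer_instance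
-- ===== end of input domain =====

-- B re-traverses column-major with a Horner (MSB-first) decode instead of A's per-cell 2**j sum;
-- equivalence of the two traversals is proved on the return value (neither mutates its input).

-- ===== PORT A =====

-- dict access variable_values[key] (first match); `none` = KeyError (excluded by Pre_)
def pvLookup (variable_values : List (String × List Bool)) (key : String) : Option (List Bool) :=
  List.lookup key variable_values

-- list[s] with bool→int; `0` stands for the IndexError/KeyError cases, which Pre_ excludes
def pvBit (variable_values : List (String × List Bool)) (i j s : Int) : Int :=
  match pvLookup variable_values ("x" ++ PySem.Int.toStr i ++ PySem.Int.toStr j) with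
  | some l => match PySem.List.pyGet? l s with
              | some b => if b then 1 else 0
              | none => 0
  | none => 0

-- from_bin_to_dec: total = Σ_j 2**j * bit
def pvFromBinToDec (i s num_bits : Int) (map_variable_values : List (String × List Bool)) : Int :=
  (PySem.List.pyRange 0 num_bits 1).foldl
    (fun total j => total + 2 ^ j.toNat * pvBit map_variable_values i j s) 0

def reverse_bit_blasting_simp (variable_values : List (String × List Bool)) (num_samples : Int) (num_vars : Int) (num_bits : Int) : List (List (String × Int)) :=
  (PySem.List.pyRange 0 num_samples 1).map (fun s =>
    (PySem.List.pyRange 0 num_vars 1).map (fun i =>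
      ("x" ++ PySem.Int.toStr i, pvFromBinToDec i s num_bits variable_values)))

-- ===== PORT B =====

-- bl[s] with bool→int (Pre_ keeps s in range)
def pvBitOf (bl : List Bool) (s : Int) : Int :=
  match PySem.List.pyGet? bl s with
  | some b => if b then 1 else 0
  | none => 0

-- one column: ('x{i}', Horner-decoded value of variable i for every sample)
def pvCol (variable_values : List (String × List Bool)) (num_samples num_bits : Int) (i : Int) : String × List Int :=
  let bit_lists := (PySem.List.pyRange (num_bits - 1) (-1) (-1)).map (fun j =>
    (pvLookup variable_values ("x" ++ PySem.Int.toStr i ++ PySem.Int.toStr j)).getD [])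
  ("x" ++ PySem.Int.toStr i,
   (PySem.List.pyRange 0 num_samples 1).map (fun s =>
     bit_lists.foldl (fun v bl => 2 * v + pvBitOf bl s) 0))

def reverse_bit_blasting_simp_alt (variable_values : List (String × List Bool)) (num_samples : Int) (num_vars : Int) (num_bits : Int) : List (List (String × Int)) :=
  if num_samples ≤ 0 then []   -- nothing to decode
  else
    let cols := (PySem.List.pyRange 0 num_vars 1).map (pvCol variable_values num_samples num_bits)
    (PySem.List.pyRange 0 num_samples 1).map (fun s =>
      cols.map (fun c => (c.1, PySem.List.pyGetD c.2 s 0)))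

-- ===== PRECONDITION & SPEC =====
-- Pre_ = exactly the inputs the Python A returns on: either no sample/variable/bit is decoded,
-- or every needed key 'x{i}{j}' is present and its list covers every sample index (else KeyError/IndexError).
-- The two length bounds are redundant (the keys 'x{i}{0}', i < num_vars, are distinct, so success forces
-- num_vars ≤ number of entries, and likewise for num_bits); they only make the decision procedure fast.
def Pre_reverse_bit_blasting_simp (variable_values : List (String × List Bool)) (num_samples : Int) (num_vars : Int) (num_bits : Int) : Prop :=
  num_samples ≤ 0 ∨ num_vars ≤ 0 ∨ num_bits ≤ 0 ∨
    (num_vars ≤ (variable_values.length : Int) ∧ num_bits ≤ (variable_values.length : Int) ∧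
    ∀ i ∈ PySem.List.pyRange 0 num_vars 1, ∀ j ∈ PySem.List.pyRange 0 num_bits 1,
      num_samples ≤ ((((pvLookup variable_values ("x" ++ PySem.Int.toStr i ++ PySem.Int.toStr j)).getD []).length : Int)))

instance (variable_values : List (String × List Bool)) (num_samples : Int) (num_vars : Int) (num_bits : Int) : Decidable (Pre_reverse_bit_blasting_simp variable_values num_samples num_vars num_bits) := by unfold Pre_reverse_bit_blasting_simp; infer_instance

def pvWitness_reverse_bit_blasting_simp : (List (String × List Bool)) × Int × Int × Int :=
  ([("x00", [true, false]), ("x01", [false, true])], 2, 1, 2)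

def Spec_reverse_bit_blasting_simp (variable_values : List (String × List Bool)) (num_samples : Int) (num_vars : Int) (num_bits : Int) (out : List (List (String × Int))) : Prop := out = reverse_bit_blasting_simp_alt variable_values num_samples num_vars num_bits
instance (variable_values : List (String × List Bool)) (num_samples : Int) (num_vars : Int) (num_bits : Int) (out : List (List (String × Int))) : Decidable (Spec_reverse_bit_blasting_simp variable_values num_samples num_vars num_bits out) := by unfold Spec_reverse_bit_blasting_simp; infer_instance

-- ===== CLAIM (what is proved, stated in full; the proofs are below) =====
def Claim_equal_reverse_bit_blasting_simp : Prop := ∀ (variable_values : List (String × List Bool)) (num_samples : Int) (num_vars : Int) (num_bits : Int), Dom_reverse_bit_blasting_simp variable_values num_samples num_vars num_bits → Pre_reverse_bit_blasting_simp variable_values num_samples num_vars num_bits → Spec_reverse_bit_blasting_simp variable_values num_samples num_vars num_bits (reverse_bit_blasting_simp variable_values num_samples num_vars num_bits)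

-- ===== LEMMAS AND PROOFS =====

-- Horner fold with an arbitrary accumulator
lemma pvHornerAcc (b : Nat → Int) (l : List Nat) (a : Int) :
    l.foldl (fun v j => 2 * v + b j) a
      = a * 2 ^ l.length + l.foldl (fun v j => 2 * v + b j) 0 := by
  induction l generalizing a with
  | nil => simp
  | cons x xs ih =>
    simp only [List.foldl_cons, List.length_cons]
    rw [ih (2 * a + b x), ih (2 * 0 + b x)]
    ring

-- LSB-first powers-of-two sum = MSB-first Horner fold, over List.range
lemma pvSumEqHorner (b : Nat → Int) (n : Nat) :
    (List.range n).foldl (fun t j => t + 2 ^ j * b j) 0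
      = (List.range n).reverse.foldl (fun v j => 2 * v + b j) 0 := by
  induction n with
  | zero => simp
  | succ n ih =>
    rw [List.range_succ, List.foldl_append, List.reverse_append]
    simp only [List.reverse_cons, List.reverse_nil, List.nil_append, List.foldl_cons,
      List.foldl_nil, List.singleton_append]
    rw [pvHornerAcc b ((List.range n).reverse) (2 * 0 + b n), ← ih]
    simp only [List.length_reverse, List.length_range]
    ring

-- per-cell agreement: A's from_bin_to_dec equals B's Horner decode of the fetched columns
lemma pvCellEq (vv : List (String × List Bool)) (nb i s : Int) :
    pvFromBinToDec i s nb vv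
      = ((PySem.List.pyRange (nb - 1) (-1) (-1)).map (fun j =>
            (pvLookup vv ("x" ++ PySem.Int.toStr i ++ PySem.Int.toStr j)).getD [])).foldl
          (fun v bl => 2 * v + pvBitOf bl s) 0 := by
  have hbit : ∀ j : Int, pvBitOf ((pvLookup vv ("x" ++ PySem.Int.toStr i ++ PySem.Int.toStr j)).getD []) s
      = pvBit vv i j s := by
    intro j
    unfold pvBitOf pvBit
    cases pvLookup vv ("x" ++ PySem.Int.toStr i ++ PySem.Int.toStr j) with
    | none => simp [PySem.List.pyGet?]
    | some l => rfl
  rw [List.foldl_map]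
  simp only [hbit]
  rw [PySem.List.pyRange_neg_one_eq_reverse]
  have h1 : (-1 : Int) + 1 = 0 := by norm_num
  have h2 : nb - 1 + 1 = nb := by ring
  rw [h1, h2]
  unfold pvFromBinToDec
  rw [PySem.List.pyRange_one 0 nb, ← List.map_reverse, List.foldl_map, List.foldl_map]
  have := pvSumEqHorner (fun k => pvBit vv i (0 + (k : Int)) s) (nb - 0).toNat
  simpa using this

theorem reverse_bit_blasting_simp_spec_aux (vv : List (String × List Bool)) (ns nv nb : Int) :
    reverse_bit_blasting_simp vv ns nv nb = reverse_bit_blasting_simp_alt vv ns nv nb := by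
  unfold reverse_bit_blasting_simp reverse_bit_blasting_simp_alt
  by_cases h : ns ≤ 0
  · simp [h, PySem.List.pyRange_one_eq_nil h]
  · simp only [h, if_false]
    apply List.map_congr_left
    intro s hs
    rw [List.map_map]
    apply List.map_congr_left
    intro i _
    simp only [Function.comp_apply, pvCol]
    refine Prod.ext rfl ?_
    have hs' := (PySem.List.mem_pyRange_one).1 hs
    rw [PySem.List.pyGetD_map_pyRange_of_nonneg _ ns s 0 hs'.1 hs'.2]
    exact pvCellEq vv nb i s

-- ===== VERDICT (by name: the statement is the Claim_ definition above) =====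
theorem reverse_bit_blasting_simp_spec : Claim_equal_reverse_bit_blasting_simp := by
  intro vv ns nv nb _ _
  exact reverse_bit_blasting_simp_spec_aux vv ns nv nb
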